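-- pv_equiv track=rewrite | github.com/Rubsun/111 | Course2_Python/map_tr/Theasure_map.py | theasure_map
-- ===== SOURCE A (Python) =====
-- def theasure_map(map_tr: list) -> str:
--     position_t = None
--     position_x = None
--     for i in range((len(map_tr))):
--         for j in range(len(map_tr[i])):
--             if map_tr[i][j] == 'x':
--                 position_x = [i, j]
--             elif map_tr[i][j] == 't':
--                 position_t = [i, j]
--     if not position_x or not position_t:
--         return 'Not found'
--
--     shift_x = position_t[1]- position_x[1]
--     shift_y = position_t[0] - position_x[0]
--     dir_x = 'W' if shift_x < 0 else 'E'
--     dir_y = 'N' if shift_y < 0 else 'S'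
--     return dir_x*abs(shift_x)+dir_y*abs(shift_y)
-- ===== SOURCE B (Python) =====
-- def find_last(grid, ch):
--     for i in range(len(grid) - 1, -1, -1):
--         row = grid[i]
--         for j in range(len(row) - 1, -1, -1):
--             if row[j] == ch:
--                 return [i, j]
--     return None
--
--
-- def theasure_map(map_tr: list) -> str:
--     position_x = find_last(map_tr, 'x')
--     position_t = find_last(map_tr, 't')
--     if position_x is None or position_t is None:
--         return 'Not found'
--     shift_x = position_t[1] - position_x[1]
--     shift_y = position_t[0] - position_x[0]
--     dir_x = 'W' if shift_x < 0 else 'E'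
--     dir_y = 'N' if shift_y < 0 else 'S'
--     return dir_x * abs(shift_x) + dir_y * abs(shift_y)
-- ===== Notes on version B (the rewrite author's own statement) =====
-- stated objective: alternative
-- what changed: Replaces A's single forward full scan that overwrites both positions with two reverse, early-exiting scans (find_last per character), which yield the same last-occurrence coordinates.
import Mathlib
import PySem

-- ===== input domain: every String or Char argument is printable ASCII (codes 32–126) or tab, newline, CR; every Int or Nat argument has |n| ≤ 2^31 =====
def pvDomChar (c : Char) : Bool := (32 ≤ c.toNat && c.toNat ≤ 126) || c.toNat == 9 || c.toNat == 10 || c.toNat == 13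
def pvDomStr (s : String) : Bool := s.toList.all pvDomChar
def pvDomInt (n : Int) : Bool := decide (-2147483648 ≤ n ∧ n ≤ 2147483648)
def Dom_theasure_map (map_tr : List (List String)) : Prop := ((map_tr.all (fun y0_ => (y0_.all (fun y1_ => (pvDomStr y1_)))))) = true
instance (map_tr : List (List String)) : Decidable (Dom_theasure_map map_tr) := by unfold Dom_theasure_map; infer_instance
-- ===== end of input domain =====

-- B does two reverse early-exiting scans instead of A's single forward overwriting scan; same result.

-- ===== PORT A =====
-- Python's  str * int  (concatenation n times), exact for n = abs ≥ 0
def pyStrMulA (s : String) (n : Int) : String := String.ofList (PySem.List.pyRepeat s.toList n)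

def theasure_map (map_tr : List (List String)) : String :=
  -- position_t = st.1, position_x = st.2 ; forward scan, overwriting on every hit
  let st := (List.range map_tr.length).foldl
    (fun (st : Option (Int × Int) × Option (Int × Int)) i =>
      (List.range (map_tr.getD i []).length).foldl
        (fun st j =>
          if (map_tr.getD i []).getD j "" = "x" then (st.1, some ((i : Int), (j : Int)))
          else if (map_tr.getD i []).getD j "" = "t" then (some ((i : Int), (j : Int)), st.2)
          else st)
        st)
    (none, none)
  match st.2, st.1 with
  | some position_x, some position_t =>
    let shift_x := position_t.2 - position_x.2
    let shift_y := position_t.1 - position_x.1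
    let dir_x := if shift_x < 0 then "W" else "E"
    let dir_y := if shift_y < 0 then "N" else "S"
    String.ofList ((pyStrMulA dir_x |shift_x|).toList ++ (pyStrMulA dir_y |shift_y|).toList)
  | _, _ => "Not found"

-- ===== PORT B =====
-- Python's  str * int  again (B's own copy)
def pyStrMulB (s : String) (n : Int) : String := String.ofList (PySem.List.pyRepeat s.toList n)

-- inner loop of find_last: j from m-1 down to 0, first match
def rowFindLast (row : List String) (ch : String) : Nat → Option Int
  | 0 => none
  | j + 1 => if row.getD j "" = ch then some ((j : Int)) else rowFindLast row ch j

-- outer loop of find_last: i from n-1 down to 0, first row containing ch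
def findLast (grid : List (List String)) (ch : String) : Nat → Option (Int × Int)
  | 0 => none
  | i + 1 =>
    match rowFindLast (grid.getD i []) ch (grid.getD i []).length with
    | some j => some ((i : Int), j)
    | none => findLast grid ch i

def theasure_map_alt (map_tr : List (List String)) : String :=
  match findLast map_tr "x" map_tr.length with
  | none => "Not found"
  | some position_x =>
    match findLast map_tr "t" map_tr.length with
    | none => "Not found"
    | some position_t =>
      let shift_x := position_t.2 - position_x.2
      let shift_y := position_t.1 - position_x.1
      let dir_x := if shift_x < 0 then "W" else "E"
      let dir_y := if shift_y < 0 then "N" else "S"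
      String.ofList ((pyStrMulB dir_x |shift_x|).toList ++ (pyStrMulB dir_y |shift_y|).toList)

-- ===== PRECONDITION & SPEC =====
def Spec_theasure_map (map_tr : List (List String)) (out : String) : Prop := out = theasure_map_alt map_tr
instance (map_tr : List (List String)) (out : String) : Decidable (Spec_theasure_map map_tr out) := by unfold Spec_theasure_map; infer_instance

-- ===== CLAIM (what is proved, stated in full; the proofs are below) =====
def Claim_equal_theasure_map : Prop := ∀ (map_tr : List (List String)), Dom_theasure_map map_tr → Spec_theasure_map map_tr (theasure_map map_tr)

-- ===== LEMMAS AND PROOFS =====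

-- overwrite an Option position with a found column (if any) in row i
def updPos (o : Option (Int × Int)) (i : Nat) (r : Option Int) : Option (Int × Int) :=
  match r with
  | some j => some ((i : Int), j)
  | none => o

theorem inner_fold_eq (row : List String) (i : Nat) (m : Nat)
    (st : Option (Int × Int) × Option (Int × Int)) :
    (List.range m).foldl
        (fun st j =>
          if row.getD j "" = "x" then (st.1, some ((i : Int), (j : Int)))
          else if row.getD j "" = "t" then (some ((i : Int), (j : Int)), st.2)
          else st)
        st
      = (updPos st.1 i (rowFindLast row "t" m), updPos st.2 i (rowFindLast row "x" m)) := by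
  induction m generalizing st with
  | zero => simp [rowFindLast, updPos]
  | succ m ih =>
    rw [List.range_succ, List.foldl_append, ih]
    simp only [List.foldl_cons, List.foldl_nil, rowFindLast]
    by_cases hx : row[m]?.getD "" = "x"
    · simp [List.getD, hx, updPos]
    · by_cases ht : row[m]?.getD "" = "t"
      · simp [List.getD, ht, updPos]
      · simp [List.getD, hx, ht]

theorem outer_fold_eq (map_tr : List (List String)) (n : Nat) :
    (List.range n).foldl
        (fun (st : Option (Int × Int) × Option (Int × Int)) i =>
          (List.range (map_tr.getD i []).length).foldl
            (fun st j =>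
              if (map_tr.getD i []).getD j "" = "x" then (st.1, some ((i : Int), (j : Int)))
              else if (map_tr.getD i []).getD j "" = "t" then (some ((i : Int), (j : Int)), st.2)
              else st)
            st)
        (none, none)
      = (findLast map_tr "t" n, findLast map_tr "x" n) := by
  induction n with
  | zero => simp [findLast]
  | succ n ih =>
    rw [List.range_succ, List.foldl_append, ih]
    simp only [List.foldl_cons, List.foldl_nil]
    rw [inner_fold_eq]
    simp only [findLast, updPos]

-- ===== VERDICT (by name: the statement is the Claim_ definition above) =====
theorem theasure_map_spec : Claim_equal_theasure_map := by
  intro map_tr _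
  show theasure_map map_tr = theasure_map_alt map_tr
  unfold theasure_map theasure_map_alt
  rw [outer_fold_eq]
  cases findLast map_tr "t" map_tr.length <;> cases findLast map_tr "x" map_tr.length <;>
    simp [pyStrMulA, pyStrMulB]
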